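-- pv_equiv track=rewrite | github.com/sowiwia/IP-Algo1 | Guías/integradores_python.py | empleados_del_mes
-- ===== SOURCE A (Python) =====
-- def suma_lista(lista: list[int]) -> int:
--     res: int = 0
--
--     for numero in lista:
--         res += numero
--
--     return res
--
-- def empleados_del_mes(horas: dict[int, list[int]]) -> list[int]:
--     res: list[int] = []
--     maximo: int = 0
--
--     for id_empleado,lista_horas in horas.items():
--         suma_horas = 0
--         suma_horas += suma_lista(lista_horas)
--         if suma_horas > maximo:
--             maximo = suma_horas
--             res = [id_empleado]
--         elif suma_horas == maximo:
--             res.append(id_empleado)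
--
--     return res
-- ===== SOURCE B (Python) =====
-- def empleados_del_mes(horas: dict[int, list[int]]) -> list[int]:
--     totales = {id_empleado: sum(lista) for id_empleado, lista in horas.items()}
--     maximo = max([0] + list(totales.values()))
--     return [id_empleado for id_empleado, total in totales.items() if total == maximo]
-- ===== Notes on version B (the rewrite author's own statement) =====
-- stated objective: simpler
-- what changed: Replaces the fused running-max loop with its reset/append state machine by three declarative passes: a totals dict comprehension, a max over [0]+totals, and a filtering comprehension.
import Mathlib
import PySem

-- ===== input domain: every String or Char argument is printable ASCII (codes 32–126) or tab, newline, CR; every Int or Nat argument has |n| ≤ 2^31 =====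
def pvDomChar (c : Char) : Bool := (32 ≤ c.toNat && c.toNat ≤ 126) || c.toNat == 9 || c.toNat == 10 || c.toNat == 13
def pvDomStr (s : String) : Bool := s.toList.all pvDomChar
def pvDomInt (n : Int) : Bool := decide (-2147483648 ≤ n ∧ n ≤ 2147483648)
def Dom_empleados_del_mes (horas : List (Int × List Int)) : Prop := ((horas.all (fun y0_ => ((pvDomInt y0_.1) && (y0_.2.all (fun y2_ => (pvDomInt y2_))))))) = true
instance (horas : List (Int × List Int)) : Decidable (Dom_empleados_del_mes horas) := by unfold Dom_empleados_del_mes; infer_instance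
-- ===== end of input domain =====

-- B replaces A's fused running-max loop (reset/append state machine) by three declarative
-- passes: totals, max against the 0 baseline, filter — objective: simpler.

-- ===== PORT A =====
def suma_lista (lista : List Int) : Int :=
  lista.foldl (fun res numero => res + numero) 0

def empleados_del_mes (horas : List (Int × List Int)) : List Int :=
  (horas.foldl
    (fun (st : List Int × Int) (p : Int × List Int) =>
      let suma_horas := 0 + suma_lista p.2
      if suma_horas > st.2 then ([p.1], suma_horas)
      else if suma_horas = st.2 then (st.1 ++ [p.1], st.2)
      else st)
    ([], 0)).1

-- ===== PORT B =====
def empleados_del_mes_alt (horas : List (Int × List Int)) : List Int :=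
  let totales := horas.map (fun p => (p.1, p.2.sum))
  let maximo := (totales.map Prod.snd).foldl max 0
  (totales.filter (fun p => p.2 == maximo)).map Prod.fst

-- ===== PRECONDITION & SPEC =====
def Spec_empleados_del_mes (horas : List (Int × List Int)) (out : List Int) : Prop := out = empleados_del_mes_alt horas
instance (horas : List (Int × List Int)) (out : List Int) : Decidable (Spec_empleados_del_mes horas out) := by unfold Spec_empleados_del_mes; infer_instance

-- ===== CLAIM (what is proved, stated in full; the proofs are below) =====
def Claim_equal_empleados_del_mes : Prop := ∀ (horas : List (Int × List Int)), Dom_empleados_del_mes horas → Spec_empleados_del_mes horas (empleados_del_mes horas)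

-- ===== LEMMAS AND PROOFS =====

theorem suma_lista_eq_sum (l : List Int) : suma_lista l = l.sum := by
  simp [suma_lista, List.sum_eq_foldl]

-- Invariant of A's loop: given running state (res, m), the fold returns the overall
-- maximum M = max of m and all totals, and the ids whose total equals M — prefixed by
-- res exactly when no total exceeded m.
theorem loopA (xs : List (Int × List Int)) (res : List Int) (m : Int) :
    xs.foldl
      (fun (st : List Int × Int) (p : Int × List Int) =>
        let suma_horas := 0 + suma_lista p.2
        if suma_horas > st.2 then ([p.1], suma_horas)
        else if suma_horas = st.2 then (st.1 ++ [p.1], st.2)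
        else st)
      (res, m)
    = (let M := (xs.map (fun p => suma_lista p.2)).foldl max m
       ((if M = m then res else []) ++ (xs.filter (fun p => suma_lista p.2 == M)).map Prod.fst, M)) := by
  induction xs generalizing res m with
  | nil => simp
  | cons a xs ih =>
    have hle : ∀ (l : List Int) (k : Int), k ≤ l.foldl max k := by
      intro l
      induction l with
      | nil => intro k; simp
      | cons b l ihl => intro k; exact le_trans (le_max_left k b) (ihl (max k b))
    simp only [List.foldl_cons, List.map_cons, List.filter_cons]
    set s := suma_lista a.2 with hs
    by_cases h1 : 0 + s > m
    · rw [if_pos h1, ih]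
      have hmax : max m s = s := by omega
      simp only [zero_add] at h1 ⊢
      simp only [← hs, hmax]
      set M := (xs.map (fun p => suma_lista p.2)).foldl max s with hMdef
      have hsM : s ≤ M := hle _ s
      by_cases h2 : M = s
      · simp only [h2]
        simp [show ¬ s = m by omega]
      · have hne : ¬ (s == M) = true := by simp; omega
        simp [h2, hne, show ¬ M = m by omega]
    · rw [if_neg h1]
      have hmax : max m (0 + s) = m := by omega
      by_cases h2 : 0 + s = m
      · rw [if_pos h2, ih]
        simp only [zero_add] at h2 hmax
        simp only [← hs, show max m s = m by omega]
        set M := (xs.map (fun p => suma_lista p.2)).foldl max m with hMdef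
        have hmM : m ≤ M := hle _ m
        by_cases h3 : M = m
        · simp [h3, h2]
        · have hb : ¬ (s == M) = true := by simp; omega
          simp [h3, hb]
      · rw [if_neg h2, ih]
        simp only [zero_add] at h1 h2 hmax
        simp only [← hs, show max m s = m by omega]
        set M := (xs.map (fun p => suma_lista p.2)).foldl max m with hMdef
        have hmM : m ≤ M := hle _ m
        have hb : ¬ (s == M) = true := by simp; omega
        simp [hb]

-- ===== VERDICT (by name: the statement is the Claim_ definition above) =====
theorem empleados_del_mes_spec : Claim_equal_empleados_del_mes := by
  intro horas _
  unfold Spec_empleados_del_mes empleados_del_mes empleados_del_mes_alt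
  rw [loopA]
  simp only [List.map_map, List.filter_map, Function.comp_def, suma_lista_eq_sum]
  by_cases h : (horas.map (fun p => (p.2).sum)).foldl max 0 = 0 <;> simp [h]
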